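-- pv_equiv track=rewrite | github.com/RumenKotsew/PythonPlayground | BinarySearch/binary_search.py | find_turning_point
-- ===== SOURCE A (Python) =====
-- def find_turning_point(array, start, end):
--     if array == sorted(array, key=int):
--         return "Array is sorted."
--     else:
--         for i in range(len(array)):
--             if array[0:i] != sorted(array[0:i], key=int):
--                 return "Turning point is " + str(array[i - 1]) + " on index " + str(i - 1) + "."
--
--     return "Turning point is " + str(array[len(array) -1]) + " on index " + str(len(array) - 1) + "."
-- ===== SOURCE B (Python) =====
-- def find_turning_point(array, start, end):
--     # Single linear scan over adjacent pairs instead of re-sorting every prefix.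
--     for i in range(len(array) - 1):
--         if array[i] > array[i + 1]:
--             return "Turning point is " + str(array[i + 1]) + " on index " + str(i + 1) + "."
--     return "Array is sorted."
-- ===== Notes on version B (the rewrite author's own statement) =====
-- stated objective: faster
-- what changed: Replaced the 'sort the whole array, then re-sort every prefix slice until one disagrees' search with a single linear scan over adjacent pairs that returns at the first descent.
import Mathlib
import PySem

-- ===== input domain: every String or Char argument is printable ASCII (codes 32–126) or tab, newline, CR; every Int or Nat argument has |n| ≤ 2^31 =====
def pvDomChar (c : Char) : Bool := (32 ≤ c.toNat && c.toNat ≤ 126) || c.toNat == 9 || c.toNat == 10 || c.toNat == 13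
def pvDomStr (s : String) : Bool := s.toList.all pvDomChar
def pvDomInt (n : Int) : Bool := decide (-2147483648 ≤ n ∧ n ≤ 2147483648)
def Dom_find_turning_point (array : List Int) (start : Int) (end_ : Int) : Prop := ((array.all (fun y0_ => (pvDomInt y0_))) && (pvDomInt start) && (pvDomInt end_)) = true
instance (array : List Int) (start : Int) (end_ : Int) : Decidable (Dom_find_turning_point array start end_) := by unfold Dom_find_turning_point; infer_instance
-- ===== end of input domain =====

-- B replaces A's repeated prefix re-sorting with one linear scan over adjacent pairs (measurably faster, asymptotic).

-- ===== PORT A =====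
-- the for-loop over range(len(array)): first i whose prefix array[0:i] is not sorted
def ftpLoopA (array : List Int) (i : Nat) : String :=
  if i < array.length then
    if PySem.List.slice array (some (0 : Int)) (some (i : Int)) ≠
        PySem.List.sorted (PySem.List.slice array (some (0 : Int)) (some (i : Int))) (fun x => x) false then
      -- array[i-1] never leaves Python's index range here (array is nonempty on this path)
      "Turning point is " ++ PySem.Int.toStr (PySem.List.pyGetD array ((i : Int) - 1) 0) ++
        " on index " ++ PySem.Int.toStr ((i : Int) - 1) ++ "."
    else ftpLoopA array (i + 1)
  else
    "Turning point is " ++ PySem.Int.toStr (PySem.List.pyGetD array ((array.length : Int) - 1) 0) ++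
      " on index " ++ PySem.Int.toStr ((array.length : Int) - 1) ++ "."
termination_by array.length - i

def find_turning_point (array : List Int) (start : Int) (end_ : Int) : String :=
  if array = PySem.List.sorted array (fun x => x) false then "Array is sorted."
  else ftpLoopA array 0

-- ===== PORT B =====
-- single scan: first adjacent descent, else sorted
def ftpLoopB (array : List Int) (i : Nat) : String :=
  if i + 1 < array.length then
    if array.getD (i + 1) 0 < array.getD i 0 then
      "Turning point is " ++ PySem.Int.toStr (array.getD (i + 1) 0) ++
        " on index " ++ PySem.Int.toStr ((i : Int) + 1) ++ "."
    else ftpLoopB array (i + 1)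
  else "Array is sorted."
termination_by array.length - i

def find_turning_point_alt (array : List Int) (start : Int) (end_ : Int) : String :=
  ftpLoopB array 0

-- ===== PRECONDITION & SPEC =====
def Spec_find_turning_point (array : List Int) (start : Int) (end_ : Int) (out : String) : Prop := out = find_turning_point_alt array start end_
instance (array : List Int) (start : Int) (end_ : Int) (out : String) : Decidable (Spec_find_turning_point array start end_ out) := by unfold Spec_find_turning_point; infer_instance

-- ===== CLAIM (what is proved, stated in full; the proofs are below) =====
def Claim_equal_find_turning_point : Prop := ∀ (array : List Int) (start : Int) (end_ : Int), Dom_find_turning_point array start end_ → Spec_find_turning_point array start end_ (find_turning_point array start end_)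

-- ===== LEMMAS AND PROOFS =====

-- the message both loops return at the first descent k
def ftpMsg (array : List Int) (k : Nat) : String :=
  "Turning point is " ++ PySem.Int.toStr (array.getD (k + 1) 0) ++
    " on index " ++ PySem.Int.toStr ((k : Int) + 1) ++ "."

lemma pairwise_adj_getD (l : List Int) :
    l.Pairwise (· ≤ ·) ↔ ∀ j, j + 1 < l.length → l.getD j 0 ≤ l.getD (j + 1) 0 := by
  rw [List.pairwise_iff_getElem]
  constructor
  · intro h j hj
    rw [List.getD_eq_getElem _ _ (by omega), List.getD_eq_getElem _ _ hj]
    exact h j (j + 1) (by omega) hj (by omega)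
  · intro h i j hi hj hij
    induction j with
    | zero => omega
    | succ m ih =>
      have hm := h m hj
      rw [List.getD_eq_getElem _ _ (by omega), List.getD_eq_getElem _ _ hj] at hm
      rcases Nat.lt_or_ge i m with hc | hc
      · exact le_trans (ih (by omega) (by omega)) hm
      · have : i = m := by omega
        subst this; exact hm

lemma sorted_fix_iff (l : List Int) :
    l = PySem.List.sorted l (fun x => x) false ↔ l.Pairwise (· ≤ ·) := by
  constructor
  · intro h
    have hp := PySem.List.sorted_pairwise (xs := l) (key := fun x => x)
    rw [← h] at hp
    simpa using hp
  · intro h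
    exact (PySem.List.sorted_eq_self_of_pairwise l (fun x => x) (by simpa using h)).symm

lemma slice_take (a : List Int) (i : Nat) :
    PySem.List.slice a (some (0 : Int)) (some (i : Int)) = a.take i := by
  simp [PySem.List.slice_zero_start, PySem.List.slice_to_natCast]

lemma getD_take (a : List Int) (i j : Nat) (h1 : j < i) (h2 : j < a.length) :
    (a.take i).getD j 0 = a.getD j 0 := by
  rw [List.getD_eq_getElem _ _ (by simp; omega), List.getD_eq_getElem _ _ h2,
    List.getElem_take]

lemma loopB_sorted (a : List Int)
    (h : ∀ j, j + 1 < a.length → a.getD j 0 ≤ a.getD (j + 1) 0) :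
    ∀ i, ftpLoopB a i = "Array is sorted." := by
  have key : ∀ d i, a.length - i ≤ d → ftpLoopB a i = "Array is sorted." := by
    intro d
    induction d with
    | zero =>
      intro i hi
      rw [ftpLoopB, if_neg (by omega)]
    | succ d ih =>
      intro i hi
      rw [ftpLoopB]
      split_ifs with h1 h2
      · exact absurd h2 (not_lt.2 (h i h1))
      · exact ih (i + 1) (by omega)
      · rfl
  intro i; exact key _ i le_rfl

lemma loopB_desc (a : List Int) (k : Nat) (hk : k + 1 < a.length)
    (hdesc : a.getD (k + 1) 0 < a.getD k 0)
    (hmin : ∀ j, j < k → a.getD j 0 ≤ a.getD (j + 1) 0) :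
    ∀ i, i ≤ k → ftpLoopB a i = ftpMsg a k := by
  have key : ∀ d i, i ≤ k → k - i ≤ d → ftpLoopB a i = ftpMsg a k := by
    intro d
    induction d with
    | zero =>
      intro i hik hd
      have : i = k := by omega
      subst this
      rw [ftpLoopB, if_pos hk, if_pos hdesc]; rfl
    | succ d ih =>
      intro i hik hd
      rcases Nat.eq_or_lt_of_le hik with rfl | hlt
      · rw [ftpLoopB, if_pos hk, if_pos hdesc]; rfl
      · rw [ftpLoopB, if_pos (by omega), if_neg (not_lt.2 (hmin i hlt))]
        exact ih (i + 1) (by omega) (by omega)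
  intro i hik; exact key _ i hik le_rfl

lemma take_eq_sorted_of_le (a : List Int) (k i : Nat)
    (hmin : ∀ j, j < k → a.getD j 0 ≤ a.getD (j + 1) 0) (hik : i ≤ k + 1) :
    a.take i = PySem.List.sorted (a.take i) (fun x => x) false := by
  rw [sorted_fix_iff, pairwise_adj_getD]
  intro j hj
  have hlen : j + 1 < min i a.length := by simpa using hj
  rw [getD_take _ _ _ (by omega) (by omega), getD_take _ _ _ (by omega) (by omega)]
  exact hmin j (by omega)

lemma take_ne_sorted (a : List Int) (k : Nat) (hk : k + 1 < a.length)
    (hdesc : a.getD (k + 1) 0 < a.getD k 0) :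
    a.take (k + 2) ≠ PySem.List.sorted (a.take (k + 2)) (fun x => x) false := by
  intro h
  have hp := (pairwise_adj_getD _).1 ((sorted_fix_iff _).1 h) k
    (by simp [List.length_take]; omega)
  rw [getD_take _ _ _ (by omega) (by omega), getD_take _ _ _ (by omega) (by omega)] at hp
  omega

lemma msg_cast (a : List Int) (k : Nat) :
    "Turning point is " ++ PySem.Int.toStr (PySem.List.pyGetD a (((k + 2 : Nat) : Int) - 1) 0) ++
      " on index " ++ PySem.Int.toStr (((k + 2 : Nat) : Int) - 1) ++ "." = ftpMsg a k := by
  have hcast : ((k + 2 : Nat) : Int) - 1 = ((k + 1 : Nat) : Int) := by push_cast; ring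
  rw [hcast, PySem.List.pyGetD_natCast, ftpMsg]
  have : ((k + 1 : Nat) : Int) = (k : Int) + 1 := by push_cast; ring
  rw [this]

lemma loopA_desc (a : List Int) (k : Nat) (hk : k + 1 < a.length)
    (hdesc : a.getD (k + 1) 0 < a.getD k 0)
    (hmin : ∀ j, j < k → a.getD j 0 ≤ a.getD (j + 1) 0) :
    ∀ i, i ≤ k + 2 → ftpLoopA a i = ftpMsg a k := by
  have base : ftpLoopA a (k + 2) = ftpMsg a k := by
    rw [ftpLoopA]
    by_cases hn : k + 2 < a.length
    · rw [if_pos hn, slice_take a (k + 2), if_pos (take_ne_sorted a k hk hdesc)]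
      exact msg_cast a k
    · have hn2 : a.length = k + 2 := by omega
      rw [if_neg (by omega), hn2]
      exact msg_cast a k
  have key : ∀ d i, i ≤ k + 2 → k + 2 - i ≤ d → ftpLoopA a i = ftpMsg a k := by
    intro d
    induction d with
    | zero =>
      intro i h1 h2
      have : i = k + 2 := by omega
      subst this; exact base
    | succ d ih =>
      intro i h1 h2
      rcases Nat.eq_or_lt_of_le h1 with rfl | hlt
      · exact base
      · have hsorted := take_eq_sorted_of_le a k i hmin (by omega)
        rw [ftpLoopA, if_pos (by omega), slice_take a i, if_neg (not_not_intro hsorted)]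
        exact ih (i + 1) (by omega) (by omega)
  intro i hik; exact key _ i hik le_rfl

-- ===== VERDICT (by name: the statement is the Claim_ definition above) =====
theorem find_turning_point_spec : Claim_equal_find_turning_point := by
  intro a s e _dom
  unfold Spec_find_turning_point find_turning_point find_turning_point_alt
  split_ifs with hs
  · have hp := (pairwise_adj_getD a).1 ((sorted_fix_iff a).1 hs)
    exact (loopB_sorted a hp 0).symm
  · have hex : ∃ m, m + 1 < a.length ∧ a.getD (m + 1) 0 < a.getD m 0 := by
      by_contra hno
      push_neg at hno
      exact hs ((sorted_fix_iff a).2 ((pairwise_adj_getD a).2 hno))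
    have hkspec := Nat.find_spec hex
    have hmin : ∀ j, j < Nat.find hex → a.getD j 0 ≤ a.getD (j + 1) 0 := by
      intro j hj
      have hm := Nat.find_min hex hj
      push_neg at hm
      exact hm (by omega)
    rw [loopA_desc a (Nat.find hex) hkspec.1 hkspec.2 hmin 0 (by omega),
      loopB_desc a (Nat.find hex) hkspec.1 hkspec.2 hmin 0 (by omega)]
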